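-- pv_equiv track=rewrite | github.com/MarisGomez/intro-programacion | Parciales y Tp grupal/Repaso recuperatorio.py | matriz_pseudo_ordenada
-- ===== SOURCE A (Python) =====
-- from queue import Queue as Cola
--
-- c = Cola
--
-- def minimo(s: list[int]) -> int:
--     menor: int = s[0]
--     for i in s:
--         if i < menor:
--             menor = i
--     return menor
--
-- def crear_columnas(matriz: list[list[int]]) -> list[list[int]]:
--     res: list[list[int]] = []
--     indice: int = 0
--     while indice < len(matriz[0]):
--         columna = []
--         for i in range(0,len(matriz)):
--             elem = matriz[i][indice]
--             columna.append(elem)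
--         indice += 1
--         res.append(columna)
--     return res
--
-- def matriz_pseudo_ordenada(matriz: list[list[int]]) -> bool:
--     lista_minimos: list[int] = []
--     columnas = crear_columnas(matriz)
--     for c in columnas:
--         lista_minimos.append(minimo(c))
--
--     res: bool = True
--     for i in range(0,len(lista_minimos)-1):
--         if not (lista_minimos[i] < lista_minimos[i+1]):
--             res = False
--     return res
--
-- matriz = [[3,4,1],[2,5,0],[7,6,9]]
-- ===== SOURCE B (Python) =====
-- def matriz_pseudo_ordenada(matriz: list[list[int]]) -> bool:
--     mins = list(matriz[0])
--     for fila in matriz[1:]: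
--         for j in range(len(mins)):
--             mins[j] = min(mins[j], fila[j])
--     return all(a < b for a, b in zip(mins, mins[1:]))
-- ===== Notes on version B (the rewrite author's own statement) =====
-- stated objective: simpler
-- what changed: B fuses the column-minima reduction into one row-major pass over the matrix (updating a running mins vector) instead of first materialising the transposed columns list, and checks strict increase with a short-circuiting all() over adjacent pairs instead of a flag-carrying index loop.
-- outside the precondition, e.g. on matriz_pseudo_ordenada([]): A raises IndexError, B raises IndexError; on matriz_pseudo_ordenada([[1, 2], [3]]): A raises IndexError, B raises IndexError
import Mathlib
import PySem

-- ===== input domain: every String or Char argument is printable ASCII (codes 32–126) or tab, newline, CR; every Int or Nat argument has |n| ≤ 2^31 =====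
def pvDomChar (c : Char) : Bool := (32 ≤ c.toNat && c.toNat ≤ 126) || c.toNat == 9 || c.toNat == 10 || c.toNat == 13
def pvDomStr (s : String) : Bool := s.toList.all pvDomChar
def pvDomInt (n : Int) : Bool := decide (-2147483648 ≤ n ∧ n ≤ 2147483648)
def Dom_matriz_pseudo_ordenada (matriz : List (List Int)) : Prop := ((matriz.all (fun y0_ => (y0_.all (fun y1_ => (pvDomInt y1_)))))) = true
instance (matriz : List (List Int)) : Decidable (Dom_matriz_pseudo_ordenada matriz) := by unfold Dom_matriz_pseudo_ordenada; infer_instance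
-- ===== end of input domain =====

-- B fuses the column-minima reduction into one row-major pass with a running mins
-- vector (no transposed copy) and checks strict increase over adjacent pairs; same
-- return value as A on every input admitted by Pre_ (objective: simpler).

-- ===== PORT A =====
-- minimo: seed with s[0], scan for a smaller element (s nonempty under Pre_, so headD 0 = s[0])
def pvMinimo (s : List Int) : Int :=
  s.foldl (fun menor i => if i < menor then i else menor) (s.headD 0)

-- crear_columnas: for each indice < len(matriz[0]), collect matriz[i][indice] over all rows
-- (row.getD j 0 = matriz[i][indice]; indices are in range under Pre_, Python raises otherwise)
def pvCrearColumnas (matriz : List (List Int)) : List (List Int) :=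
  (List.range (matriz.headD []).length).map (fun indice =>
    matriz.map (fun fila => fila.getD indice 0))

def matriz_pseudo_ordenada (matriz : List (List Int)) : Bool :=
  let listaMinimos := (pvCrearColumnas matriz).map pvMinimo
  (List.range (listaMinimos.length - 1)).foldl
    (fun res i =>
      if !(decide (listaMinimos.getD i 0 < listaMinimos.getD (i + 1) 0)) then false else res)
    true

-- ===== PORT B =====
-- one row-major pass: mins starts as matriz[0], each later row lowers mins pointwise
-- (fila.getD j 0 = fila[j]; in range under Pre_, Python raises otherwise)
def matriz_pseudo_ordenada_alt (matriz : List (List Int)) : Bool :=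
  let mins := matriz.tail.foldl
    (fun mins fila =>
      (List.range mins.length).map (fun j => min (mins.getD j 0) (fila.getD j 0)))
    (matriz.headD [])
  (mins.zip mins.tail).all (fun p => decide (p.1 < p.2))

-- ===== PRECONDITION & SPEC =====
-- Pre_ excludes exactly the inputs where Python A raises IndexError: the empty matrix
-- (matriz[0]) and jagged matrices with a row shorter than the first row (matriz[i][indice]).
-- Python B raises IndexError on exactly the same inputs.
def Pre_matriz_pseudo_ordenada (matriz : List (List Int)) : Prop :=
  matriz ≠ [] ∧ ∀ fila ∈ matriz, (matriz.headD []).length ≤ fila.length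
instance (matriz : List (List Int)) : Decidable (Pre_matriz_pseudo_ordenada matriz) := by
  unfold Pre_matriz_pseudo_ordenada; infer_instance

def pvWitness_matriz_pseudo_ordenada : List (List Int) := [[3, 4, 1], [2, 5, 0], [7, 6, 9]]

def Spec_matriz_pseudo_ordenada (matriz : List (List Int)) (out : Bool) : Prop := out = matriz_pseudo_ordenada_alt matriz
instance (matriz : List (List Int)) (out : Bool) : Decidable (Spec_matriz_pseudo_ordenada matriz out) := by unfold Spec_matriz_pseudo_ordenada; infer_instance

-- ===== CLAIM (what is proved, stated in full; the proofs are below) =====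
def Claim_equal_matriz_pseudo_ordenada : Prop := ∀ (matriz : List (List Int)), Dom_matriz_pseudo_ordenada matriz → Pre_matriz_pseudo_ordenada matriz → Spec_matriz_pseudo_ordenada matriz (matriz_pseudo_ordenada matriz)

-- ===== LEMMAS AND PROOFS =====

-- A's flag-carrying loop is an `and` over the range
lemma foldl_flag (c : Nat → Bool) (l : List Nat) (b : Bool) :
    l.foldl (fun res i => if !(c i) then false else res) b = (b && l.all c) := by
  induction l generalizing b with
  | nil => simp
  | cons x xs ih =>
    simp only [List.foldl_cons, List.all_cons, ih]
    cases c x <;> simp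

-- indexed adjacent-pairs check = zip-with-tail check
lemma range_adj_eq_zip (l : List Int) :
    (List.range (l.length - 1)).all (fun i => decide (l.getD i 0 < l.getD (i + 1) 0))
      = (l.zip l.tail).all (fun p => decide (p.1 < p.2)) := by
  induction l with
  | nil => simp
  | cons a t ih =>
    cases t with
    | nil => simp
    | cons b t' =>
      have h := ih
      simp only [List.length_cons, Nat.add_sub_cancel] at h ⊢
      rw [List.range_succ_eq_map]
      simp only [List.all_cons, List.all_map, List.zip_cons_cons, List.tail_cons] at h ⊢
      rw [← h]
      simp only [Function.comp_def, Nat.succ_eq_add_one, List.getD_cons_succ, List.getD_cons_zero]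

-- mins after B's fold, pointwise
lemma foldl_mins (t : List (List Int)) (mins : List Int) :
    t.foldl (fun mins fila =>
        (List.range mins.length).map (fun j => min (mins.getD j 0) (fila.getD j 0))) mins
      = (List.range mins.length).map
          (fun j => t.foldl (fun acc fila => min acc (fila.getD j 0)) (mins.getD j 0)) := by
  induction t generalizing mins with
  | nil =>
    apply List.ext_getElem
    · simp
    · intro i h1 h2
      simp only [List.foldl_nil] at h1
      simp [h1]
  | cons r t' ih =>
    simp only [List.foldl_cons]
    rw [ih]
    have hlen : ((List.range mins.length).map
        (fun j => min (mins.getD j 0) (r.getD j 0))).length = mins.length := by simp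
    rw [hlen]
    apply List.map_congr_left
    intro j hj
    have hj' : j < mins.length := List.mem_range.mp hj
    simp [List.getD_eq_getElem?_getD, hj']

lemma if_lt_eq_min (a i : Int) : (if i < a then i else a) = min a i := by
  rcases lt_or_ge i a with h | h
  · simp [h, min_eq_right h.le]
  · simp [not_lt.mpr h, min_eq_left h]

-- pvMinimo on a mapped nonempty list is the running-min fold
lemma pvMinimo_map (f : List Int → Int) (h : List Int) (t : List (List Int)) :
    pvMinimo ((h :: t).map f) = t.foldl (fun acc fila => min acc (f fila)) (f h) := by
  simp only [pvMinimo, List.map_cons, List.headD_cons, List.foldl_cons, List.foldl_map,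
    if_lt_eq_min]
  simp

-- ===== VERDICT (by name: the statement is the Claim_ definition above) =====
theorem matriz_pseudo_ordenada_spec : Claim_equal_matriz_pseudo_ordenada := by
  intro matriz _hdom hpre
  unfold Spec_matriz_pseudo_ordenada
  obtain ⟨hne, -⟩ := hpre
  obtain ⟨h, t, rfl⟩ : ∃ h t, matriz = h :: t := by
    cases matriz with
    | nil => exact absurd rfl hne
    | cons h t => exact ⟨h, t, rfl⟩
  unfold matriz_pseudo_ordenada matriz_pseudo_ordenada_alt
  simp only [List.tail_cons, List.headD_cons]
  rw [foldl_mins]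
  have hmins :
      (pvCrearColumnas (h :: t)).map pvMinimo
        = (List.range h.length).map
            (fun j => t.foldl (fun acc fila => min acc (fila.getD j 0)) (h.getD j 0)) := by
    unfold pvCrearColumnas
    simp only [List.headD_cons, List.map_map]
    apply List.map_congr_left
    intro j _
    exact pvMinimo_map (fun fila => fila.getD j 0) h t
  rw [hmins, foldl_flag, Bool.true_and, range_adj_eq_zip]
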